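-- pv_equiv track=rewrite | github.com/pythonianfr/tshistory_refinery | tshistory_refinery/helper.py | reduce_frequency
-- ===== SOURCE A (Python) =====
-- def reduce_frequency(tempo, idates):
--     assert len(tempo)
--     assert len(idates)
--     new_tempo = []
--     for cdate in tempo:
--         if len([idate for idate in idates if idate <= cdate]):
--             new_tempo.append(cdate)
--             idates = [idate for idate in idates if idate > cdate]
--
--     return new_tempo
-- ===== SOURCE B (Python) =====
-- def reduce_frequency(tempo, idates):
--     # Sort idates once; a pointer j marks the consumed prefix, so the
--     # remaining idates are s[j:] and their minimum is s[j].
--     s = sorted(idates)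
--     m = len(s)
--     j = 0
--     out = []
--     for cdate in tempo:
--         if j < m and s[j] <= cdate:
--             out.append(cdate)
--             while j < m and s[j] <= cdate:
--                 j += 1
--     return out
-- ===== Notes on version B (the rewrite author's own statement) =====
-- stated objective: faster
-- what changed: Instead of rebuilding and rescanning the whole idates list for every tempo date, B sorts idates once and walks a single pointer forward (the remaining idates are a suffix of the sorted list, whose minimum is its head).
import Mathlib
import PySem

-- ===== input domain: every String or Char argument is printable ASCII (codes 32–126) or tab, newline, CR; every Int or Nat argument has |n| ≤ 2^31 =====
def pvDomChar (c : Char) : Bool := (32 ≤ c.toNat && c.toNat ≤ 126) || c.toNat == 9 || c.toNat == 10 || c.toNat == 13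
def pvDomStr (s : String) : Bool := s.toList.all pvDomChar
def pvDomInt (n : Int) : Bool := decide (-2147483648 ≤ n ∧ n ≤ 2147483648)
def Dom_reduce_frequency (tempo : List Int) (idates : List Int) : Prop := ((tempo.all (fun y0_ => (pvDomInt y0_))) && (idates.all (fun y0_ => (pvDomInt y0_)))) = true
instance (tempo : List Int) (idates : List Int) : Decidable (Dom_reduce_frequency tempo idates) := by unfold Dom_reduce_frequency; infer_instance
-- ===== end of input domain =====

-- B sorts idates once and walks a pointer instead of rescanning idates per tempo date (faster).

-- ===== PORT A =====
-- literal transliteration of A's loop: state = (new_tempo, idates)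
def reduce_frequency (tempo : List Int) (idates : List Int) : List Int :=
  (tempo.foldl
    (fun (st : List Int × List Int) cdate =>
      if ((st.2.filter (fun idate => idate ≤ cdate)).length) ≠ 0 then
        (st.1 ++ [cdate], st.2.filter (fun idate => idate > cdate))
      else st)
    ([], idates)).1

-- ===== PORT B =====
-- the inner 'while j < m and s[j] <= cdate: j += 1'
def rfAdvance (s : List Int) (cdate : Int) (j : Nat) : Nat :=
  if j < s.length ∧ s.getD j 0 ≤ cdate then rfAdvance s cdate (j + 1) else j
termination_by s.length - j
decreasing_by omega

def reduce_frequency_alt (tempo : List Int) (idates : List Int) : List Int :=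
  let s := PySem.List.sorted idates (fun x => x) false
  (tempo.foldl
    (fun (st : List Int × Nat) cdate =>
      if st.2 < s.length ∧ s.getD st.2 0 ≤ cdate then
        (st.1 ++ [cdate], rfAdvance s cdate st.2)
      else st)
    ([], 0)).1

-- ===== PRECONDITION & SPEC =====
-- A asserts both lists nonempty (AssertionError otherwise); Pre_ excludes exactly those inputs.
def Pre_reduce_frequency (tempo : List Int) (idates : List Int) : Prop := tempo ≠ [] ∧ idates ≠ []
instance (tempo : List Int) (idates : List Int) : Decidable (Pre_reduce_frequency tempo idates) := by unfold Pre_reduce_frequency; infer_instance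
def pvWitness_reduce_frequency : List Int × List Int := ([2, 1, 5], [1, 3])

def Spec_reduce_frequency (tempo : List Int) (idates : List Int) (out : List Int) : Prop := out = reduce_frequency_alt tempo idates
instance (tempo : List Int) (idates : List Int) (out : List Int) : Decidable (Spec_reduce_frequency tempo idates out) := by unfold Spec_reduce_frequency; infer_instance

-- ===== CLAIM (what is proved, stated in full; the proofs are below) =====
def Claim_equal_reduce_frequency : Prop := ∀ (tempo : List Int) (idates : List Int), Dom_reduce_frequency tempo idates → Pre_reduce_frequency tempo idates → Spec_reduce_frequency tempo idates (reduce_frequency tempo idates)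

-- ===== LEMMAS AND PROOFS =====

-- a sorted list's dropWhile (≤ c) is its filter (> c)
theorem dropWhile_eq_filter_of_sorted (c : Int) :
    ∀ (t : List Int), t.Pairwise (· ≤ ·) →
      t.dropWhile (fun i => decide (i ≤ c)) = t.filter (fun i => decide (i > c)) := by
  intro t ht
  induction t with
  | nil => simp
  | cons a t ih =>
    rw [List.pairwise_cons] at ht
    by_cases h : a ≤ c
    · simp [h, not_lt.mpr h, ih ht.2]
    · push Not at h
      rw [List.dropWhile_cons, if_neg (by simpa using not_le.mpr h),
        List.filter_cons, if_pos (by simpa using h)]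
      rw [List.filter_eq_self.mpr]
      intro b hb
      simpa using lt_of_lt_of_le h (ht.1 b hb)

-- rfAdvance moves the pointer past exactly the suffix elements ≤ c
theorem rfAdvance_drop (s : List Int) (c : Int) (j : Nat) (hj : j ≤ s.length) :
    rfAdvance s c j ≤ s.length ∧
      s.drop (rfAdvance s c j) = (s.drop j).dropWhile (fun i => decide (i ≤ c)) := by
  rw [rfAdvance]
  split_ifs with h
  · obtain ⟨hlt, hle⟩ := h
    have ih := rfAdvance_drop s c (j + 1) hlt
    refine ⟨ih.1, ?_⟩
    rw [ih.2, List.drop_eq_getElem_cons hlt, List.dropWhile_cons,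
      if_pos (by simpa using (List.getD_eq_getElem s 0 hlt ▸ hle))]
  · rcases Nat.lt_or_ge j s.length with hlt | hge
    · refine ⟨hj, ?_⟩
      have hnle : ¬ s.getD j 0 ≤ c := fun hc => h ⟨hlt, hc⟩
      rw [List.drop_eq_getElem_cons hlt, List.dropWhile_cons,
        if_neg (by rw [List.getD_eq_getElem s 0 hlt] at hnle; simpa using hnle)]
    · have : j = s.length := le_antisymm hj hge
      subst this
      simp
termination_by s.length - j
decreasing_by omega

-- the fired condition matches: some remaining idate ≤ c  ↔  s[j] exists and ≤ c
theorem cond_iff (s : List Int) (hs : s.Pairwise (· ≤ ·)) (c : Int) (j : Nat)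
    (rem : List Int) (hperm : rem.Perm (s.drop j)) :
    ((rem.filter (fun i => decide (i ≤ c))).length ≠ 0) ↔ (j < s.length ∧ s.getD j 0 ≤ c) := by
  have hex : ((rem.filter (fun i => decide (i ≤ c))).length ≠ 0) ↔ ∃ i ∈ rem, i ≤ c := by
    rw [Ne, List.length_eq_zero_iff, List.filter_eq_nil_iff]
    push Not
    simp
  rw [hex]
  constructor
  · rintro ⟨i, hi, hic⟩
    have hmem : i ∈ s.drop j := hperm.mem_iff.mp hi
    have hlt : j < s.length := by
      by_contra hge
      rw [List.drop_eq_nil_of_le (Nat.le_of_not_lt hge)] at hmem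
      exact absurd hmem (List.not_mem_nil)
    refine ⟨hlt, ?_⟩
    have hdrop : s.drop j = s[j] :: s.drop (j + 1) := List.drop_eq_getElem_cons hlt
    have hpair : (s.drop j).Pairwise (· ≤ ·) := hs.sublist (List.drop_sublist j s)
    rw [hdrop, List.pairwise_cons] at hpair
    rw [List.getD_eq_getElem s 0 hlt]
    rcases List.mem_cons.mp (hdrop ▸ hmem) with h | h
    · exact h ▸ hic
    · exact le_trans (hpair.1 i h) hic
  · rintro ⟨hlt, hle⟩
    refine ⟨s.getD j 0, hperm.mem_iff.mpr ?_, hle⟩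
    rw [List.drop_eq_getElem_cons hlt, List.getD_eq_getElem s 0 hlt]
    exact List.mem_cons_self

theorem main_invariant (s : List Int) (hs : s.Pairwise (· ≤ ·)) :
    ∀ (tempo : List Int) (rem acc : List Int) (j : Nat),
      j ≤ s.length → rem.Perm (s.drop j) →
      (tempo.foldl
        (fun (st : List Int × List Int) cdate =>
          if ((st.2.filter (fun idate => idate ≤ cdate)).length) ≠ 0 then
            (st.1 ++ [cdate], st.2.filter (fun idate => idate > cdate))
          else st) (acc, rem)).1 =
      (tempo.foldl
        (fun (st : List Int × Nat) cdate =>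
          if st.2 < s.length ∧ s.getD st.2 0 ≤ cdate then
            (st.1 ++ [cdate], rfAdvance s cdate st.2)
          else st) (acc, j)).1 := by
  intro tempo
  induction tempo with
  | nil => intro rem acc j hj hperm; rfl
  | cons c tempo ih =>
    intro rem acc j hj hperm
    simp only [List.foldl_cons]
    have hcond := cond_iff s hs c j rem hperm
    by_cases h : j < s.length ∧ s.getD j 0 ≤ c
    · rw [if_pos (hcond.mpr h), if_pos h]
      obtain ⟨hadv, hdrop⟩ := rfAdvance_drop s c j hj
      refine ih _ _ _ hadv ?_
      rw [hdrop, dropWhile_eq_filter_of_sorted c _ (hs.sublist (List.drop_sublist j s))]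
      exact hperm.filter _
    · rw [if_neg (fun hc => h (hcond.mp hc)), if_neg h]
      exact ih rem acc j hj hperm

-- ===== VERDICT (by name: the statement is the Claim_ definition above) =====
theorem reduce_frequency_spec : Claim_equal_reduce_frequency := by
  intro tempo idates _ _
  unfold Spec_reduce_frequency reduce_frequency reduce_frequency_alt
  exact main_invariant _ (PySem.List.sorted_pairwise idates (fun x => x))
    tempo idates [] 0 (by simp) (by simpa using (PySem.List.sorted_perm idates (fun x => x) false).symm)
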